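-- pv_equiv track=rewrite | github.com/JesseDonkers/Simulation_Everdell | engine/selectors.py | _iter_discounted_requirements
-- ===== SOURCE A (Python) =====
-- def _iter_discounted_requirements(requirements, discount):
--     twig = requirements.get("twig", 0)
--     resin = requirements.get("resin", 0)
--     pebble = requirements.get("pebble", 0)
--     berry = requirements.get("berry", 0)
--
--     max_discount = min(discount, twig + resin + pebble + berry)
--     unique_costs = []
--     seen = set()
--
--     for twig_reduce in range(min(twig, max_discount) + 1):
--         rem_after_twig = max_discount - twig_reduce
--
--         for resin_reduce in range(min(resin, rem_after_twig) + 1):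
--             rem_after_resin = rem_after_twig - resin_reduce
--
--             for pebble_reduce in range(min(pebble, rem_after_resin) + 1):
--                 rem_after_pebble = rem_after_resin - pebble_reduce
--
--                 for berry_reduce in range(min(berry, rem_after_pebble) + 1):
--                     # Partial discount is allowed, so not all discount
--                     # must be used.
--                     cost = {
--                         "twig": twig - twig_reduce,
--                         "resin": resin - resin_reduce,
--                         "pebble": pebble - pebble_reduce,
--                         "berry": berry - berry_reduce,
--                     }
--
--                     key = (
--                         cost["twig"],
--                         cost["resin"],
--                         cost["pebble"],
--                         cost["berry"],
--                     )
--                     if key not in seen: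
--                         seen.add(key)
--                         unique_costs.append(cost)
--
--     return unique_costs
-- ===== SOURCE B (Python) =====
-- def _iter_discounted_requirements(requirements, discount):
--     names = ["twig", "resin", "pebble", "berry"]
--     counts = [requirements.get(n, 0) for n in names]
--     max_discount = min(discount, sum(counts))
--
--     def go(items, remaining):
--         # base case: one (empty) partial cost; each level extends every tail
--         if not items:
--             return [{}]
--         (name, count), rest = items[0], items[1:]
--         result = []
--         for r in range(min(count, remaining) + 1):
--             for tail in go(rest, remaining - r):
--                 result.append({name: count - r, **tail})
--         return result
--
--     return go(list(zip(names, counts)), max_discount)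
-- ===== Notes on version B (the rewrite author's own statement) =====
-- stated objective: simpler
-- what changed: Replaces the four hard-coded nested loops plus a redundant seen-set dedup with one recursive backtracking helper over the ordered (name,count) list that threads the remaining discount budget; since the reduction tuples are already pairwise distinct the dedup set is dropped entirely.
import Mathlib
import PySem

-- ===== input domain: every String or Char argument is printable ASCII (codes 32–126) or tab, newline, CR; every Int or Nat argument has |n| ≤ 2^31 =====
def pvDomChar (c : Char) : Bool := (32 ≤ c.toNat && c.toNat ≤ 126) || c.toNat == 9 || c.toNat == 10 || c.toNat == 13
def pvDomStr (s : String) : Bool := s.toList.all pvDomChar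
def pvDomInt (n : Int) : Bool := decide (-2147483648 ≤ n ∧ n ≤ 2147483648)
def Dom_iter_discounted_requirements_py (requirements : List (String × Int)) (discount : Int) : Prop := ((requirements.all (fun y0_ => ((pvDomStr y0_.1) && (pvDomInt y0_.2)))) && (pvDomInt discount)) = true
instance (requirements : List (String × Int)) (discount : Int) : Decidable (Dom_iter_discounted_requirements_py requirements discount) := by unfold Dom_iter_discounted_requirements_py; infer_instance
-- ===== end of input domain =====

-- B replaces A's four hard-coded nested loops and redundant seen-set dedup with one
-- recursive backtracking helper over the ordered (name,count) list (objective: simpler).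


-- ===== PORT A =====
def iter_discounted_requirements_py (requirements : List (String × Int)) (discount : Int) : List (List (String × Int)) :=
  let twig := PySem.Dict.getD (PySem.Dict.mk requirements) "twig" 0
  let resin := PySem.Dict.getD (PySem.Dict.mk requirements) "resin" 0
  let pebble := PySem.Dict.getD (PySem.Dict.mk requirements) "pebble" 0
  let berry := PySem.Dict.getD (PySem.Dict.mk requirements) "berry" 0
  let maxDiscount := min discount (twig + resin + pebble + berry)
  let st :=
    (PySem.List.pyRange 0 (min twig maxDiscount + 1) 1).foldl (fun st tr =>
      let remAfterTwig := maxDiscount - tr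
      (PySem.List.pyRange 0 (min resin remAfterTwig + 1) 1).foldl (fun st rr =>
        let remAfterResin := remAfterTwig - rr
        (PySem.List.pyRange 0 (min pebble remAfterResin + 1) 1).foldl (fun st pr =>
          let remAfterPebble := remAfterResin - pr
          (PySem.List.pyRange 0 (min berry remAfterPebble + 1) 1).foldl (fun st br =>
            let cost : List (String × Int) :=
              [("twig", twig - tr), ("resin", resin - rr), ("pebble", pebble - pr), ("berry", berry - br)]
            let key : Int × Int × Int × Int := (twig - tr, resin - rr, pebble - pr, berry - br)
            if PySem.Set.contains st.1 key then st
            else (PySem.Set.add st.1 key, st.2 ++ [cost])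
          ) st) st) st)
      ((PySem.Set.empty : PySem.Set (Int × Int × Int × Int)), ([] : List (List (String × Int))))
  st.2

-- ===== PORT B =====
-- recursive helper 'go(items, remaining)' of Source B
def pvAltGo : List (String × Int) → Int → List (List (String × Int))
  | [], _ => [[]]
  | (name, count) :: rest, remaining =>
    (PySem.List.pyRange 0 (min count remaining + 1) 1).foldl (fun result r =>
      (pvAltGo rest (remaining - r)).foldl (fun result tail =>
        result ++ [(name, count - r) :: tail]) result) []

def iter_discounted_requirements_py_alt (requirements : List (String × Int)) (discount : Int) : List (List (String × Int)) :=
  let names : List String := ["twig", "resin", "pebble", "berry"]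
  let counts := names.map (fun n => PySem.Dict.getD (PySem.Dict.mk requirements) n 0)
  let maxDiscount := min discount counts.sum
  pvAltGo (names.zip counts) maxDiscount

-- ===== PRECONDITION & SPEC =====
def Spec_iter_discounted_requirements_py (requirements : List (String × Int)) (discount : Int) (out : List (List (String × Int))) : Prop := out = iter_discounted_requirements_py_alt requirements discount
instance (requirements : List (String × Int)) (discount : Int) (out : List (List (String × Int))) : Decidable (Spec_iter_discounted_requirements_py requirements discount out) := by unfold Spec_iter_discounted_requirements_py; infer_instance

-- ===== CLAIM (what is proved, stated in full; the proofs are below) =====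
def Claim_equal_iter_discounted_requirements_py : Prop := ∀ (requirements : List (String × Int)) (discount : Int), Dom_iter_discounted_requirements_py requirements discount → Spec_iter_discounted_requirements_py requirements discount (iter_discounted_requirements_py requirements discount)

-- ===== LEMMAS AND PROOFS =====

-- the quadruples (twig_reduce, resin_reduce, pebble_reduce, berry_reduce) visited by A's nested loops
def pvQuads (t r p b m : Int) : List (Int × Int × Int × Int) :=
  (PySem.List.pyRange 0 (min t m + 1) 1).flatMap (fun tr =>
    (PySem.List.pyRange 0 (min r (m - tr) + 1) 1).flatMap (fun rr =>
      (PySem.List.pyRange 0 (min p (m - tr - rr) + 1) 1).flatMap (fun pr =>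
        (PySem.List.pyRange 0 (min b (m - tr - rr - pr) + 1) 1).map (fun br => (tr, rr, pr, br)))))

def pvKey (t r p b : Int) (q : Int × Int × Int × Int) : Int × Int × Int × Int :=
  (t - q.1, r - q.2.1, p - q.2.2.1, b - q.2.2.2)

def pvCost (t r p b : Int) (q : Int × Int × Int × Int) : List (String × Int) :=
  [("twig", t - q.1), ("resin", r - q.2.1), ("pebble", p - q.2.2.1), ("berry", b - q.2.2.2)]

def pvStep (t r p b : Int)
    (st : PySem.Set (Int × Int × Int × Int) × List (List (String × Int)))
    (q : Int × Int × Int × Int) :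
    PySem.Set (Int × Int × Int × Int) × List (List (String × Int)) :=
  if PySem.Set.contains st.1 (pvKey t r p b q) then st
  else (PySem.Set.add st.1 (pvKey t r p b q), st.2 ++ [pvCost t r p b q])

theorem pv_foldl_flatMap {α β σ : Type} (f : σ → β → σ) (g : α → List β) (xs : List α) (s : σ) :
    (xs.flatMap g).foldl f s = xs.foldl (fun st x => (g x).foldl f st) s := by
  induction xs generalizing s with
  | nil => rfl
  | cons x xs ih => simp [List.flatMap_cons, List.foldl_append, ih]

theorem pv_nodup_flatMap_tag {α β : Type} (xs : List α) (f : α → List β) (tag : β → α)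
    (hx : xs.Nodup) (ht : ∀ x, ∀ y ∈ f x, tag y = x) (hf : ∀ x, (f x).Nodup) :
    (xs.flatMap f).Nodup := by
  induction xs with
  | nil => simp
  | cons x xs ih =>
    rw [List.flatMap_cons, List.nodup_append]
    refine ⟨hf x, ih hx.of_cons, ?_⟩
    intro y hy z hz heq
    subst heq
    rcases List.mem_flatMap.mp hz with ⟨x', hx', hyx'⟩
    have h12 : x = x' := (ht x y hy).symm.trans (ht x' y hyx')
    exact (List.nodup_cons.mp hx).1 (h12 ▸ hx')

theorem pvKey_inj (t r p b : Int) (q q' : Int × Int × Int × Int)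
    (h : pvKey t r p b q = pvKey t r p b q') : q = q' := by
  obtain ⟨a1, a2, a3, a4⟩ := q
  obtain ⟨b1, b2, b3, b4⟩ := q'
  simp [pvKey, Prod.ext_iff] at h ⊢
  omega

theorem pv_nodup_quads (t r p b m : Int) : (pvQuads t r p b m).Nodup := by
  unfold pvQuads
  apply pv_nodup_flatMap_tag _ _ (fun q => q.1) (PySem.List.nodup_pyRange_one _ _)
  · intro tr y hy
    rcases List.mem_flatMap.mp hy with ⟨rr, _, hy⟩
    rcases List.mem_flatMap.mp hy with ⟨pr, _, hy⟩
    rcases List.mem_map.mp hy with ⟨br, _, rfl⟩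
    rfl
  · intro tr
    apply pv_nodup_flatMap_tag _ _ (fun q => q.2.1) (PySem.List.nodup_pyRange_one _ _)
    · intro rr y hy
      rcases List.mem_flatMap.mp hy with ⟨pr, _, hy⟩
      rcases List.mem_map.mp hy with ⟨br, _, rfl⟩
      rfl
    · intro rr
      apply pv_nodup_flatMap_tag _ _ (fun q => q.2.2.1) (PySem.List.nodup_pyRange_one _ _)
      · intro pr y hy
        rcases List.mem_map.mp hy with ⟨br, _, rfl⟩
        rfl
      · intro pr
        exact (PySem.List.nodup_pyRange_one _ _).map
          (fun x y h => by simpa [Prod.ext_iff] using h)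

theorem pv_dedup_fold (t r p b : Int) (qs : List (Int × Int × Int × Int))
    (seen : PySem.Set (Int × Int × Int × Int)) (out : List (List (String × Int)))
    (hnd : qs.Nodup) (hfresh : ∀ q ∈ qs, pvKey t r p b q ∉ seen) :
    (qs.foldl (pvStep t r p b) (seen, out)).2 = out ++ qs.map (pvCost t r p b) := by
  induction qs generalizing seen out with
  | nil => simp
  | cons q qs ih =>
    have hq : pvKey t r p b q ∉ seen := hfresh q List.mem_cons_self
    have hfresh' : ∀ q' ∈ qs, pvKey t r p b q' ∉ PySem.Set.add seen (pvKey t r p b q) := by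
      intro q' hq' hmem
      rcases (PySem.Set.mem_add seen _ _).mp hmem with h | h
      · exact hfresh q' (List.mem_cons_of_mem _ hq') h
      · exact (List.nodup_cons.mp hnd).1 (pvKey_inj t r p b q' q h ▸ hq')
    have hstep : pvStep t r p b (seen, out) q
        = (PySem.Set.add seen (pvKey t r p b q), out ++ [pvCost t r p b q]) := by
      simp [pvStep, hq]
    rw [List.foldl_cons, hstep, ih _ _ hnd.of_cons hfresh']
    simp

-- A's nested loops are the dedup fold over pvQuads
theorem pvA_eq_fold (requirements : List (String × Int)) (discount : Int) :
    iter_discounted_requirements_py requirements discount =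
      ((pvQuads (PySem.Dict.getD (PySem.Dict.mk requirements) "twig" 0) (PySem.Dict.getD (PySem.Dict.mk requirements) "resin" 0)
          (PySem.Dict.getD (PySem.Dict.mk requirements) "pebble" 0) (PySem.Dict.getD (PySem.Dict.mk requirements) "berry" 0)
          (min discount (PySem.Dict.getD (PySem.Dict.mk requirements) "twig" 0 + PySem.Dict.getD (PySem.Dict.mk requirements) "resin" 0 +
            PySem.Dict.getD (PySem.Dict.mk requirements) "pebble" 0 + PySem.Dict.getD (PySem.Dict.mk requirements) "berry" 0))).foldl
        (pvStep (PySem.Dict.getD (PySem.Dict.mk requirements) "twig" 0) (PySem.Dict.getD (PySem.Dict.mk requirements) "resin" 0)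
          (PySem.Dict.getD (PySem.Dict.mk requirements) "pebble" 0) (PySem.Dict.getD (PySem.Dict.mk requirements) "berry" 0))
        (PySem.Set.empty, [])).2 := by
  unfold iter_discounted_requirements_py pvQuads
  simp only [pv_foldl_flatMap, List.foldl_map, pvStep, pvKey, pvCost]

-- B's recursion enumerates exactly the costs of pvQuads, in order
theorem pvB_eq_map (t r p b m : Int) :
    pvAltGo [("twig", t), ("resin", r), ("pebble", p), ("berry", b)] m
      = (pvQuads t r p b m).map (pvCost t r p b) := by
  simp only [pvAltGo, pvQuads, PySem.List.foldl_append_singleton_eq_map,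
    PySem.List.foldl_append_eq_flatMap, List.map_flatMap, List.map_map, List.map_cons,
    List.map_nil, List.nil_append]
  rfl

-- ===== VERDICT (by name: the statement is the Claim_ definition above) =====
theorem iter_discounted_requirements_py_spec : Claim_equal_iter_discounted_requirements_py := by
  intro requirements discount _
  unfold Spec_iter_discounted_requirements_py
  rw [pvA_eq_fold]
  rw [pv_dedup_fold _ _ _ _ _ _ _ (pv_nodup_quads _ _ _ _ _) (by intro q _ h; simp [PySem.Set.empty] at h)]
  rw [List.nil_append, ← pvB_eq_map]
  unfold iter_discounted_requirements_py_alt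
  simp only [List.map_cons, List.map_nil, List.zip_cons_cons, List.zip_nil_right, List.sum_cons, List.sum_nil]
  have harith : ∀ t r p b : Int, t + (r + (p + (b + 0))) = t + r + p + b := by intros; ring
  rw [harith]
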